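-- pv_equiv track=rewrite | github.com/AlbertMargaryan/Python_CPS109_Problems_Solution | main.py | taxi_zum_zum
-- ===== SOURCE A (Python) =====
-- def taxi_zum_zum(moves):
--     directions = ["W", "N", "E", "S"]
--     currentDirection = "N"
--     currentLocation = (0, 0)
--
--     for move in moves:
--         if move == "F":
--             x, y = currentLocation
--             if currentDirection == "N":
--                 currentLocation = (x, y + 1)
--             elif currentDirection == "S":
--                 currentLocation = (x, y - 1)
--             elif currentDirection == "E":
--                 currentLocation = (x + 1, y)
--             elif currentDirection == "W":
--                 currentLocation = (x - 1, y)
--         elif move == "L":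
--             currentDirection = directions[directions.index(currentDirection) - 1]
--         elif move == "R":
--             currentDirection = directions[directions.index(currentDirection) - 3]
--     return currentLocation
-- ===== SOURCE B (Python) =====
-- def taxi_zum_zum(moves):
--     x = y = 0
--     dx, dy = 0, 1
--     for m in moves:
--         if m == 'F':
--             x += dx
--             y += dy
--         elif m == 'L':
--             dx, dy = -dy, dx
--         elif m == 'R':
--             dx, dy = dy, -dx
--     return (x, y)
-- ===== Notes on version B (the rewrite author's own statement) =====
-- stated objective: idiomatic
-- what changed: Replaces the string direction list with index arithmetic and the 4-way forward branch by a heading vector (dx,dy) rotated in place, so forward is a single vector addition.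
import Mathlib
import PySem

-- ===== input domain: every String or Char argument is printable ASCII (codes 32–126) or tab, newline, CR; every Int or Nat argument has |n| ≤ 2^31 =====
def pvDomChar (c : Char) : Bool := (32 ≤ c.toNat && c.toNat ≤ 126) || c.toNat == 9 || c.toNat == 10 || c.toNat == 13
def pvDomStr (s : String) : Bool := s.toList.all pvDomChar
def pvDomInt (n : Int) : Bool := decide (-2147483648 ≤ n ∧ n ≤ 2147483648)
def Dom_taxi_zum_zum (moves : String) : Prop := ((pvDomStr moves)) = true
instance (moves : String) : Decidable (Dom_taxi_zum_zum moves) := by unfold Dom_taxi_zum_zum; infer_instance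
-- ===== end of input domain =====

-- B replaces the string-direction list/index arithmetic with a rotated heading vector (idiomatic rewrite, same cost).


-- ===== PORT A =====
def pvDirs : List String := ["W", "N", "E", "S"]

-- one iteration of A's loop; state = (currentDirection, currentLocation)
def pvStepA (st : String × Int × Int) (move : Char) : String × Int × Int :=
  let cur := st.1
  let x := st.2.1
  let y := st.2.2
  if move = 'F' then
    if cur = "N" then (cur, x, y + 1)
    else if cur = "S" then (cur, x, y - 1)
    else if cur = "E" then (cur, x + 1, y)
    else if cur = "W" then (cur, x - 1, y)
    else st
  else if move = 'L' then
    -- directions[directions.index(cur) - 1]; index always succeeds here, getD defaults are unreachable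
    ((PySem.List.pyGet? pvDirs (((PySem.List.index? pvDirs cur).getD 0 : Int) - 1)).getD cur, x, y)
  else if move = 'R' then
    ((PySem.List.pyGet? pvDirs (((PySem.List.index? pvDirs cur).getD 0 : Int) - 3)).getD cur, x, y)
  else st

def taxi_zum_zum (moves : String) : Int × Int :=
  (moves.toList.foldl pvStepA ("N", 0, 0)).2

-- ===== PORT B =====
-- one iteration of B's loop; state = (x, y, dx, dy)
def pvStepB (st : Int × Int × Int × Int) (m : Char) : Int × Int × Int × Int :=
  let x := st.1; let y := st.2.1; let dx := st.2.2.1; let dy := st.2.2.2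
  if m = 'F' then (x + dx, y + dy, dx, dy)
  else if m = 'L' then (x, y, -dy, dx)
  else if m = 'R' then (x, y, dy, -dx)
  else st

def taxi_zum_zum_alt (moves : String) : Int × Int :=
  let r := moves.toList.foldl pvStepB (0, 0, 0, 1)
  (r.1, r.2.1)

-- ===== PRECONDITION & SPEC =====
def Spec_taxi_zum_zum (moves : String) (out : Int × Int) : Prop := out = taxi_zum_zum_alt moves
instance (moves : String) (out : Int × Int) : Decidable (Spec_taxi_zum_zum moves out) := by unfold Spec_taxi_zum_zum; infer_instance

-- ===== CLAIM (what is proved, stated in full; the proofs are below) =====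
def Claim_equal_taxi_zum_zum : Prop := ∀ (moves : String), Dom_taxi_zum_zum moves → Spec_taxi_zum_zum moves (taxi_zum_zum moves)

-- ===== LEMMAS AND PROOFS =====

-- coupling invariant: A's direction string paired with B's heading vector
def pvRel : List (String × Int × Int) :=
  [("N", 0, 1), ("S", 0, -1), ("E", 1, 0), ("W", -1, 0)]

theorem pvFold_eq (l : List Char) :
    ∀ d x y dx dy, (d, dx, dy) ∈ pvRel →
      (List.foldl pvStepA (d, x, y) l).2 =
        ((List.foldl pvStepB (x, y, dx, dy) l).1, (List.foldl pvStepB (x, y, dx, dy) l).2.1) := by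
  induction l with
  | nil => intro d x y dx dy h; rfl
  | cons c l ih =>
    intro d x y dx dy h
    simp only [pvRel, List.mem_cons, List.not_mem_nil, or_false] at h
    rcases h with h | h | h | h <;> cases h <;>
      simp only [List.foldl_cons, pvStepA, pvStepB] <;>
      by_cases hF : c = 'F' <;> by_cases hL : c = 'L' <;> by_cases hR : c = 'R' <;>
        simp only [hF, hL, hR, if_true, if_false, sub_eq_add_neg, reduceIte] <;>
        try simp_all
    all_goals exact ih _ _ _ _ _ (by decide)

theorem taxi_zum_zum_spec : Claim_equal_taxi_zum_zum := by
  intro moves _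
  unfold Spec_taxi_zum_zum taxi_zum_zum taxi_zum_zum_alt
  exact pvFold_eq moves.toList "N" 0 0 0 1 (by decide)
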